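-- pv_equiv track=rewrite | github.com/RedRem95/AoC | AoC/y2024/Day10/__init__.py | get_trails
-- ===== SOURCE A (Python) =====
-- from typing import Callable, AnyStr, List, Tuple, Set, Optional
--
-- def _next_steps(pos: Tuple[int, int]):
--     y, x = pos
--     return [(y - 1, x + 0), (y - 0, x + 1), (y + 1, x + 0), (y + 0, x - 1)]
--
-- def get_trail(pos: List[Tuple[int, int]], topo_map: List[List[Optional[int]]], target_height: int) -> Set[
--     Tuple[Tuple[int, int], ...]]:
--     if not (0 <= pos[-1][0] < len(topo_map) and 0 <= pos[-1][1] < len(topo_map[pos[-1][0]])):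
--         return set()
--     current_tile = topo_map[pos[-1][0]][pos[-1][1]]
--     if current_tile == target_height:
--         return {tuple(pos)}
--     if current_tile is None:
--         return set()
--     ret = set()
--     for step in _next_steps(pos[-1]):
--         if 0 <= step[0] < len(topo_map) and 0 <= step[1] < len(topo_map[step[0]]):
--             if topo_map[step[0]][step[1]] == current_tile + 1:
--                 ret = ret.union(get_trail(pos + [step], topo_map, target_height))
--     return ret
--
-- def get_trails(topo_map: List[List[Optional[int]]], starting_height: int, target_height: int) -> List[
--     Set[Tuple[Tuple[int, int], ...]]]:
--     ret = []
--     for i in range(len(topo_map)):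
--         for j in range(len(topo_map[i])):
--             if topo_map[i][j] == starting_height:
--                 ret.append(get_trail([(i, j)], topo_map, target_height))
--     return ret
-- ===== SOURCE B (Python) =====
-- from typing import List, Optional, Set, Tuple
--
--
-- def get_trails(topo_map: List[List[Optional[int]]], starting_height: int, target_height: int) -> List[
--         Set[Tuple[Tuple[int, int], ...]]]:
--     ret = []
--     for i, row in enumerate(topo_map):
--         for j, tile in enumerate(row):
--             if tile == starting_height:
--                 found = set()
--                 stack = [[(i, j)]]
--                 while stack:
--                     path = stack.pop()
--                     y, x = path[-1]
--                     h = topo_map[y][x]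
--                     if h == target_height:
--                         found.add(tuple(path))
--                     else:
--                         for step in ((y, x - 1), (y + 1, x), (y, x + 1), (y - 1, x)):
--                             if 0 <= step[0] < len(topo_map) and 0 <= step[1] < len(topo_map[step[0]]) \
--                                     and topo_map[step[0]][step[1]] == h + 1:
--                                 stack.append(path + [step])
--                 ret.append(found)
--     return ret
-- ===== Notes on version B (the rewrite author's own statement) =====
-- stated objective: alternative
-- what changed: A's per-trailhead recursive DFS that unions one result set per neighbour call is replaced by an iterative DFS over an explicit stack of partial paths that adds each completed trail to a single set per trailhead.
import Mathlib
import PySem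

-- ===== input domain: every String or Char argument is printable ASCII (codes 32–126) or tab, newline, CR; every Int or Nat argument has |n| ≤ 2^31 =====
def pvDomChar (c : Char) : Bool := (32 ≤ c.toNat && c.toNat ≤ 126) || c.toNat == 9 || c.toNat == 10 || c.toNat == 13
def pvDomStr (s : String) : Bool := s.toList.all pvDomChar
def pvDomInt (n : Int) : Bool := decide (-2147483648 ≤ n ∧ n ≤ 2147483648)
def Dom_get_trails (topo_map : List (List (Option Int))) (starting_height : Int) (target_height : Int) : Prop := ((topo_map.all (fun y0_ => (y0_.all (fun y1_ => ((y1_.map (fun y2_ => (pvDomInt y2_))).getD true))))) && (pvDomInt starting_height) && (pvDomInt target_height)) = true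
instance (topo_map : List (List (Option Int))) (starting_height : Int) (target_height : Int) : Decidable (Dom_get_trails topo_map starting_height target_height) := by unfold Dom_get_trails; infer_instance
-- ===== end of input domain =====

-- termination helper for pvRun (cited in its decreasing_by)
theorem pvM_children_lt (fuel : Nat) (path : List (Int × Int)) (l : List (Int × Int))
    (hl : l.length ≤ 4) :
    (List.map ((fun e : Nat × List (Int × Int) => 5 ^ e.1) ∘ fun s => (fuel, path ++ [s])) l).sum
      < 5 ^ (fuel + 1) := by
  have hsum : (List.map ((fun e : Nat × List (Int × Int) => 5 ^ e.1) ∘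
      fun s => (fuel, path ++ [s])) l).sum = l.length * 5 ^ fuel := by
    clear hl
    induction l with
    | nil => simp
    | cons a t ih => simp [ih, Nat.succ_mul, Nat.add_comm]
  rw [hsum, pow_succ]
  have h5 : 0 < 5 ^ fuel := pow_pos (by norm_num) fuel
  nlinarith

-- B replaces A's per-trailhead recursive set-union DFS by an iterative explicit-stack DFS that adds
-- each completed trail to one set per trailhead; same return value, no recursion and no repeated set unions.

-- ===== PORT A =====
-- helpers shared by both ports (the same subexpressions occur verbatim in both Pythons):
-- Python `_next_steps(pos)`
def pvNextSteps (pos : Int × Int) : List (Int × Int) :=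
  [(pos.1 - 1, pos.2 + 0), (pos.1 - 0, pos.2 + 1), (pos.1 + 1, pos.2 + 0), (pos.1 + 0, pos.2 - 1)]

-- Python `0 <= p[0] < len(topo_map) and 0 <= p[1] < len(topo_map[p[0]])`
def pvBounds (topo : List (List (Option Int))) (p : Int × Int) : Bool :=
  decide (0 ≤ p.1) && decide (p.1 < (topo.length : Int)) && decide (0 ≤ p.2) &&
    decide (p.2 < ((PySem.List.pyGetD topo p.1 []).length : Int))

-- Python `topo_map[p[0]][p[1]]` (only used where pvBounds holds, so the defaults are never read)
def pvTile (topo : List (List (Option Int))) (p : Int × Int) : Option Int :=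
  PySem.List.pyGetD (PySem.List.pyGetD topo p.1 []) p.2 none

-- Python `0 <= step... and topo_map[step[0]][step[1]] == current_tile + 1` (nested ifs = conjunction)
def pvStep (topo : List (List (Option Int))) (c : Int) (s : Int × Int) : Bool :=
  pvBounds topo s && decide (pvTile topo s = some (c + 1))

-- Python `get_trail(pos, topo_map, target_height)`.  The recursion is totalised with a fuel argument;
-- along a trail the height rises by 1 per step so positions never repeat, hence recursion depth is
-- at most the number of cells and the fuel `(Σ row lengths) + 2` passed by get_trails never runs out.
def pvGetTrail (topo : List (List (Option Int))) (target : Int) :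
    Nat → List (Int × Int) → PySem.Set (List (Int × Int))
  | 0, _ => PySem.Set.empty
  | fuel + 1, pos =>
    match PySem.List.pyGet? pos (-1) with   -- pos[-1]; pos is never empty when called
    | none => PySem.Set.empty
    | some lp =>
      if pvBounds topo lp then
        if pvTile topo lp = some target then PySem.Set.ofList [pos]
        else
          match pvTile topo lp with
          | none => PySem.Set.empty
          | some c =>
            (pvNextSteps lp).foldl
              (fun ret step =>
                if pvStep topo c step then
                  PySem.Set.union ret (pvGetTrail topo target fuel (pos ++ [step]))
                else ret)
              PySem.Set.empty
      else PySem.Set.empty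

def get_trails (topo_map : List (List (Option Int))) (starting_height : Int) (target_height : Int) :
    List (List (List (Int × Int))) :=
  let fuel := (topo_map.map List.length).sum + 2
  (PySem.List.pyRange 0 (topo_map.length : Int)).foldl
    (fun ret i =>
      (PySem.List.pyRange 0 ((PySem.List.pyGetD topo_map i []).length : Int)).foldl
        (fun ret j =>
          if pvTile topo_map (i, j) = some starting_height then
            ret ++ [(pvGetTrail topo_map target_height fuel [(i, j)] : List (List (Int × Int)))]
          else ret)
        ret)
    []

-- ===== PORT B =====
-- stack measure: each pop either drops an entry or replaces fuel+1 by at most 4 entries of fuel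
def pvM (st : List (Nat × List (Int × Int))) : Nat := (st.map (fun e => 5 ^ e.1)).sum

-- Python B's `while stack:` loop for one trailhead.  The stack top is at the HEAD here, so Python's
-- `stack.append(...)` of the successive candidates becomes prepending them in reverse.  Entries carry
-- the fuel that totalises the loop (never exhausted, as for pvGetTrail).
def pvRun (topo : List (List (Option Int))) (target : Int) :
    List (Nat × List (Int × Int)) → PySem.Set (List (Int × Int)) → PySem.Set (List (Int × Int))
  | [], found => found
  | (0, _) :: stack, found => pvRun topo target stack found
  | (fuel + 1, path) :: stack, found =>
    match PySem.List.pyGet? path (-1) with   -- y, x = path[-1]; never empty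
    | none => pvRun topo target stack found
    | some (y, x) =>
      match pvTile topo (y, x) with
      | some h =>
        if h = target then
          pvRun topo target stack (PySem.Set.add found path)
        else
          pvRun topo target
            (((([(y, x - 1), (y + 1, x), (y, x + 1), (y - 1, x)].filter
                  (fun s => pvStep topo h s)).map (fun s => (fuel, path ++ [s]))).reverse) ++ stack)
            found
      | none => pvRun topo target stack found   -- unreachable: every stacked tile is an int
  termination_by st _ => pvM st
  decreasing_by
  all_goals simp [pvM, List.sum_append, List.map_reverse, List.sum_reverse, List.map_map]
  exact pvM_children_lt _ _ _ (by simpa using List.length_filter_le _ _)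

def get_trails_alt (topo_map : List (List (Option Int))) (starting_height : Int) (target_height : Int) :
    List (List (List (Int × Int))) :=
  let fuel := (topo_map.map List.length).sum + 2
  (PySem.List.enumerate topo_map).foldl
    (fun ret ir =>
      (PySem.List.enumerate ir.2).foldl
        (fun ret jt =>
          if jt.2 = some starting_height then
            ret ++ [(pvRun topo_map target_height [(fuel, [(ir.1, jt.1)])] PySem.Set.empty :
              List (List (Int × Int)))]
          else ret)
        ret)
    []

-- ===== PRECONDITION & SPEC =====
def Spec_get_trails (topo_map : List (List (Option Int))) (starting_height : Int) (target_height : Int) (out : List (List (List (Int × Int)))) : Prop := out = get_trails_alt topo_map starting_height target_height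
instance (topo_map : List (List (Option Int))) (starting_height : Int) (target_height : Int) (out : List (List (List (Int × Int)))) : Decidable (Spec_get_trails topo_map starting_height target_height out) := by unfold Spec_get_trails; infer_instance

-- ===== CLAIM (what is proved, stated in full; the proofs are below) =====
def Claim_equal_get_trails : Prop := ∀ (topo_map : List (List (Option Int))) (starting_height : Int) (target_height : Int), Dom_get_trails topo_map starting_height target_height → Spec_get_trails topo_map starting_height target_height (get_trails topo_map starting_height target_height)

-- ===== LEMMAS AND PROOFS =====

-- list-level form of the DFS both programs perform (proof-only)
def dfsL (topo : List (List (Option Int))) (target : Int) :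
    Nat → List (Int × Int) → List (List (Int × Int))
  | 0, _ => []
  | fuel + 1, pos =>
    match PySem.List.pyGet? pos (-1) with
    | none => []
    | some lp =>
      if pvBounds topo lp then
        if pvTile topo lp = some target then [pos]
        else
          match pvTile topo lp with
          | none => []
          | some c =>
            ((pvNextSteps lp).filter (pvStep topo c)).flatMap
              (fun s => dfsL topo target fuel (pos ++ [s]))
      else []

theorem pvNextSteps_nodup (lp : Int × Int) : (pvNextSteps lp).Nodup := by
  simp [pvNextSteps, Prod.ext_iff]
  omega

theorem pv_prefix_get (pos : List (Int × Int)) (s : Int × Int) (q : List (Int × Int))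
    (h : pos ++ [s] <+: q) : q[pos.length]? = some s := by
  obtain ⟨t, rfl⟩ := h
  rw [List.getElem?_append_left (by simp)]
  simp

-- distinct trails found from distinct next steps never collide: they differ at index n
theorem pv_flatMap_nodup {n : Nat} (L : (Int × Int) → List (List (Int × Int)))
    (g : (Int × Int) → Bool) (hL : ∀ s, (L s).Nodup)
    (hidx : ∀ s q, q ∈ L s → q[n]? = some s)
    (ss : List (Int × Int)) (hss : ss.Nodup) : ((ss.filter g).flatMap L).Nodup := by
  rw [List.nodup_flatMap]
  refine ⟨fun s _ => hL s, List.Pairwise.imp ?_ (hss.filter g)⟩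
  intro a b hab q hqa hqb
  have h2 := hidx b q hqb
  rw [hidx a q hqa] at h2
  exact hab (Option.some.inj h2)

-- A's set-union fold equals plain concatenation: siblings' trail sets are pairwise disjoint
theorem pv_foldl_union {n : Nat} (L : (Int × Int) → List (List (Int × Int)))
    (g : (Int × Int) → Bool) (hL : ∀ s, (L s).Nodup)
    (hidx : ∀ s q, q ∈ L s → q[n]? = some s) :
    ∀ (ss : List (Int × Int)), ss.Nodup →
    ∀ (acc : List (List (Int × Int))),
      (∀ q ∈ acc, ∃ t, t ∉ ss ∧ q[n]? = some t) →
      ss.foldl (fun r s => if g s then PySem.Set.union r (L s) else r) acc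
        = acc ++ (ss.filter g).flatMap L := by
  intro ss
  induction ss with
  | nil => intro _ acc _; simp
  | cons a t ih =>
    intro hnd acc hacc
    by_cases hg : g a
    · have hdisj : ∀ x ∈ L a, x ∉ acc := by
        intro x hx hxa
        obtain ⟨u, hu, hqu⟩ := hacc x hxa
        have := hidx a x hx
        rw [this] at hqu
        exact hu (by simp [← Option.some.inj hqu])
      have hun : PySem.Set.union acc (L a) = acc ++ L a := by
        rw [PySem.Set.union_eq_update]
        exact PySem.Set.update_eq_append_of_disjoint acc (L a) (hL a) hdisj
      rw [List.foldl_cons, if_pos hg, hun]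
      rw [ih hnd.of_cons (acc ++ L a) ?_]
      · simp [hg]
      · intro q hq
        rcases List.mem_append.mp hq with h | h
        · obtain ⟨u, hu, hqu⟩ := hacc q h
          exact ⟨u, fun hmem => hu (List.mem_cons_of_mem a hmem), hqu⟩
        · refine ⟨a, ?_, hidx a q h⟩
          have := hnd
          simp [List.nodup_cons] at this
          exact this.1
    · rw [List.foldl_cons, if_neg hg]
      rw [ih hnd.of_cons acc ?_]
      · simp [hg]
      · intro q hq
        obtain ⟨u, hu, hqu⟩ := hacc q hq
        exact ⟨u, fun hmem => hu (List.mem_cons_of_mem a hmem), hqu⟩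

-- A's recursive DFS computes dfsL, whose results are duplicate-free extensions of pos
theorem pv_dfsA (topo : List (List (Option Int))) (target : Int) :
    ∀ (fuel : Nat) (pos : List (Int × Int)),
      (pvGetTrail topo target fuel pos : List (List (Int × Int))) = dfsL topo target fuel pos
      ∧ (dfsL topo target fuel pos).Nodup
      ∧ ∀ q ∈ dfsL topo target fuel pos, pos <+: q := by
  intro fuel
  induction fuel with
  | zero => intro pos; simp [pvGetTrail, dfsL, PySem.Set.empty]
  | succ f ih =>
    intro pos
    cases hlp : PySem.List.pyGet? pos (-1) with
    | none => simp [pvGetTrail, dfsL, hlp, PySem.Set.empty]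
    | some lp =>
      by_cases hb : pvBounds topo lp = true
      · by_cases ht : pvTile topo lp = some target
        · simp [pvGetTrail, dfsL, hlp, hb, ht, PySem.Set.ofList, PySem.Set.add, PySem.Set.empty]
        · cases hc : pvTile topo lp with
          | none => simp [pvGetTrail, dfsL, hlp, hb, hc, PySem.Set.empty]
          | some c =>
            have hct : ¬ c = target := fun h => ht (by rw [hc, h])
            have hunfL : dfsL topo target (f + 1) pos
                = ((pvNextSteps lp).filter (pvStep topo c)).flatMap
                    (fun s => dfsL topo target f (pos ++ [s])) := by
              simp [dfsL, hlp, hb, hc, hct]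
            have hunfA : (pvGetTrail topo target (f + 1) pos : List (List (Int × Int)))
                = (pvNextSteps lp).foldl
                    (fun r s => if pvStep topo c s then
                        PySem.Set.union r (pvGetTrail topo target f (pos ++ [s])) else r)
                    PySem.Set.empty := by
              simp [pvGetTrail, hlp, hb, hc, hct]
            have hL : ∀ s, (dfsL topo target f (pos ++ [s])).Nodup := fun s => (ih _).2.1
            have hidx : ∀ s q, q ∈ dfsL topo target f (pos ++ [s]) → q[pos.length]? = some s :=
              fun s q hq => pv_prefix_get pos s q ((ih _).2.2 q hq)
            have hfold := pv_foldl_union (n := pos.length)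
              (L := fun s => dfsL topo target f (pos ++ [s])) (g := pvStep topo c)
              hL hidx (pvNextSteps lp) (pvNextSteps_nodup lp) [] (by simp)
            refine ⟨?_, ?_, ?_⟩
            · rw [hunfA, hunfL]
              have hfun : ∀ p', (pvGetTrail topo target f p' : PySem.Set (List (Int × Int)))
                  = dfsL topo target f p' := fun p' => (ih p').1
              simp only [hfun]
              simpa [PySem.Set.empty] using hfold
            · rw [hunfL]
              exact pv_flatMap_nodup _ _ hL hidx (pvNextSteps lp) (pvNextSteps_nodup lp)
            · rw [hunfL]
              intro q hq
              obtain ⟨s, _, hqs⟩ := List.mem_flatMap.mp hq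
              exact (pos.prefix_append [s]).trans ((ih (pos ++ [s])).2.2 q hqs)
      · simp [pvGetTrail, dfsL, hlp, hb, PySem.Set.empty]

-- B's stack loop folds the same dfsL trail lists, in A's order, into the found-set
theorem pv_runEq (topo : List (List (Option Int))) (target : Int) :
    ∀ (stack : List (Nat × List (Int × Int))) (found : PySem.Set (List (Int × Int))),
      (∀ e ∈ stack, ∀ lp, PySem.List.pyGet? e.2 (-1) = some lp → pvBounds topo lp = true) →
      pvRun topo target stack found
        = PySem.Set.update found (stack.flatMap (fun e => dfsL topo target e.1 e.2)) := by
  intro stack found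
  induction stack, found using pvRun.induct topo target with
  | case1 found => intro _; simp [pvRun, PySem.Set.update]
  | case2 path stack found ih =>
    intro hinv
    rw [pvRun]
    rw [ih (fun e he => hinv e (List.mem_cons_of_mem _ he))]
    simp [dfsL]
  | case3 fuel path stack found hlp ih =>
    intro hinv
    simp only [pvRun, hlp]
    rw [ih (fun e he => hinv e (List.mem_cons_of_mem _ he))]
    have hnil : dfsL topo target (fuel + 1) path = [] := by simp [dfsL, hlp]
    simp [hnil]
  | case4 fuel path stack found y x hlp ht ih =>
    intro hinv
    have hb : pvBounds topo (y, x) = true := hinv _ (List.mem_cons_self) _ hlp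
    simp only [pvRun, hlp, ht]
    rw [ih (fun e he => hinv e (List.mem_cons_of_mem _ he))]
    have hone : dfsL topo target (fuel + 1) path = [path] := by simp [dfsL, hlp, hb, ht]
    simp only [if_true, List.flatMap_cons]
    rw [hone, List.singleton_append, PySem.Set.update_cons]
  | case5 fuel path stack found y x hlp h hc hne ih =>
    intro hinv
    have hb : pvBounds topo (y, x) = true := hinv _ (List.mem_cons_self) _ hlp
    have hinv' : ∀ e ∈ (List.map (fun s => (fuel, path ++ [s]))
          (List.filter (fun s => pvStep topo h s)
            [(y, x - 1), (y + 1, x), (y, x + 1), (y - 1, x)])).reverse ++ stack,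
        ∀ lp, PySem.List.pyGet? e.2 (-1) = some lp → pvBounds topo lp = true := by
      intro e he lp hlpe
      rcases List.mem_append.mp he with hm | hm
      · rw [List.mem_reverse] at hm
        obtain ⟨sx, hs, rfl⟩ := List.mem_map.mp hm
        rw [PySem.List.pyGet?_neg_one_append_singleton] at hlpe
        cases hlpe
        have hstep := List.of_mem_filter hs
        simp [pvStep] at hstep
        exact hstep.1
      · exact hinv e (List.mem_cons_of_mem _ hm) lp hlpe
    simp only [pvRun, hlp, hc, if_neg hne]
    rw [ih hinv']
    congr 1
    have hunf : dfsL topo target (fuel + 1) path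
        = ((pvNextSteps (y, x)).filter (pvStep topo h)).flatMap
            (fun s => dfsL topo target fuel (path ++ [s])) := by
      simp [dfsL, hlp, hb, hc, hne]
    rw [List.flatMap_cons, hunf, List.flatMap_append]
    congr 1
    have hrev : ([(y, x - 1), (y + 1, x), (y, x + 1), (y - 1, x)] : List (Int × Int)).reverse
        = pvNextSteps (y, x) := by simp [pvNextSteps]
    rw [← List.map_reverse, ← List.filter_reverse, hrev, List.flatMap_map]
  | case6 fuel path stack found y x hlp hc ih =>
    intro hinv
    have hb : pvBounds topo (y, x) = true := hinv _ (List.mem_cons_self) _ hlp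
    simp only [pvRun, hlp, hc]
    rw [ih (fun e he => hinv e (List.mem_cons_of_mem _ he))]
    have hnil : dfsL topo target (fuel + 1) path = [] := by simp [dfsL, hlp, hb, hc]
    simp [hnil]

-- per trailhead: B's stack loop returns exactly A's trail set
theorem pv_cell (topo : List (List (Option Int))) (target : Int) (fuel : Nat) (i j : Int)
    (hb : pvBounds topo (i, j) = true) :
    (pvRun topo target [(fuel, [(i, j)])] PySem.Set.empty : List (List (Int × Int)))
      = pvGetTrail topo target fuel [(i, j)] := by
  have hone : PySem.List.pyGet? [(i, j)] (-1) = some (i, j) := by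
    simpa using PySem.List.pyGet?_neg_one_append_singleton ([] : List (Int × Int)) (i, j)
  rw [pv_runEq topo target _ _ ?_]
  · simp only [List.flatMap_cons, List.flatMap_nil, List.append_nil]
    rw [show (PySem.Set.empty : PySem.Set (List (Int × Int))) = [] from rfl,
      PySem.Set.update_nil_left,
      PySem.Set.ofList_eq_self_of_nodup _ (pv_dfsA topo target fuel [(i, j)]).2.1]
    exact ((pv_dfsA topo target fuel [(i, j)]).1).symm
  · intro e he lp hlpe
    rw [List.mem_singleton] at he
    subst he
    rw [hone] at hlpe
    cases hlpe
    exact hb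

theorem get_trails_spec : Claim_equal_get_trails := by
  unfold Claim_equal_get_trails Spec_get_trails
  intro topo start target _
  simp only [get_trails, get_trails_alt]
  rw [PySem.List.enumerate_eq_map_pyRange topo [], List.foldl_map]
  apply List.foldl_ext
  intro acc i hi
  rw [PySem.List.mem_pyRange_one] at hi
  rw [PySem.List.enumerate_eq_map_pyRange _ (none : Option Int), List.foldl_map]
  apply List.foldl_ext
  intro acc2 jt hj
  rw [PySem.List.mem_pyRange_one] at hj
  have hb : pvBounds topo (i, jt) = true := by
    simp only [pvBounds, Bool.and_eq_true, decide_eq_true_eq]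
    omega
  rw [pv_cell topo target _ i jt hb]
  rfl
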